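-- pv_equiv track=rewrite | github.com/whpjy/share_chat_data | utils/helpers.py | clear_group_and_compare_in_key
-- ===== SOURCE A (Python) =====
-- def clear_group_and_compare_in_key(key, group, compare):
--     for word in group:
--         if word in key:
--             key.remove(word)
--
--     for word in compare:
--         if word in key:
--             key.remove(word)
--
--     return key
-- ===== SOURCE B (Python) =====
-- def clear_group_and_compare_in_key(key, group, compare):
--     budget = {}
--     for w in group:
--         budget[w] = budget.get(w, 0) + 1
--     for w in compare:
--         budget[w] = budget.get(w, 0) + 1
--     out = []
--     for w in key:
--         b = budget.get(w, 0)
--         if b: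
--             budget[w] = b - 1
--         else:
--             out.append(w)
--     key[:] = out
--     return key
-- ===== Notes on version B (the rewrite author's own statement) =====
-- stated objective: faster
-- what changed: Replaces repeated 'in'/remove scans of key (one per group/compare word) by a removal-budget counter built once over group+compare and a single pass over key that skips budgeted leftmost occurrences.
import Mathlib
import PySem

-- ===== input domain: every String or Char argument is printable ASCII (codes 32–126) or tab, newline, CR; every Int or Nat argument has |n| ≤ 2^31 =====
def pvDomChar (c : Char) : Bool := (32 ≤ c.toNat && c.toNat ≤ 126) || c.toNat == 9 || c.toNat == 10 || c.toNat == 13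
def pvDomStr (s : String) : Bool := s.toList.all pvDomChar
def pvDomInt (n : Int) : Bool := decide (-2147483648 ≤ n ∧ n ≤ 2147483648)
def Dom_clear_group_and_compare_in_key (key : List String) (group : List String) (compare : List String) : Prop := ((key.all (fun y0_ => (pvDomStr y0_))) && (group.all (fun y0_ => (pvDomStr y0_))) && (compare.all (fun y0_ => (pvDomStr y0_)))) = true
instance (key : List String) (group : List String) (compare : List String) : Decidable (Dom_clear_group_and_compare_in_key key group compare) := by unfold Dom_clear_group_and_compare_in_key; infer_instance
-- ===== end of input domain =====

-- B replaces A's per-word membership scan + remove of key by a removal-budget counter over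
-- group+compare and one pass over key (faster); both A and B mutate key in place in Python,
-- ending with the same list contents, and the equivalence proved here is about the return value.

-- ===== PORT A =====
-- each loop iteration: if word in key: key.remove(word)
def pvRemoveStep (k : List String) (w : String) : List String :=
  if k.contains w then (PySem.List.remove? k w).getD k else k

def clear_group_and_compare_in_key (key : List String) (group : List String) (compare : List String) : List String :=
  let k1 := group.foldl pvRemoveStep key
  let k2 := compare.foldl pvRemoveStep k1
  k2

-- ===== PORT B =====
-- budget[w] = budget.get(w, 0) + 1 over a word list
def pvCountInto (d : PySem.Dict String Int) (ws : List String) : PySem.Dict String Int :=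
  ws.foldl (fun d w => d.insert w (d.getD w 0 + 1)) d

-- the single pass over key: skip w while its budget is nonzero (truthy), else keep it
def pvPass (budget : PySem.Dict String Int) : List String → List String
  | [] => []
  | w :: ws =>
    let b := budget.getD w 0
    if b ≠ 0 then pvPass (budget.insert w (b - 1)) ws
    else w :: pvPass budget ws

def clear_group_and_compare_in_key_alt (key : List String) (group : List String) (compare : List String) : List String :=
  let budget := pvCountInto (pvCountInto PySem.Dict.empty group) compare
  pvPass budget key

-- ===== PRECONDITION & SPEC =====
def Spec_clear_group_and_compare_in_key (key : List String) (group : List String) (compare : List String) (out : List String) : Prop := out = clear_group_and_compare_in_key_alt key group compare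
instance (key : List String) (group : List String) (compare : List String) (out : List String) : Decidable (Spec_clear_group_and_compare_in_key key group compare out) := by unfold Spec_clear_group_and_compare_in_key; infer_instance

-- ===== CLAIM (what is proved, stated in full; the proofs are below) =====
def Claim_equal_clear_group_and_compare_in_key : Prop := ∀ (key : List String) (group : List String) (compare : List String), Dom_clear_group_and_compare_in_key key group compare → Spec_clear_group_and_compare_in_key key group compare (clear_group_and_compare_in_key key group compare)

-- ===== LEMMAS AND PROOFS =====

-- reference function: walk key with a budget function, skip while budget nonzero
def pvF : List String → (String → Int) → List String
  | [], _ => []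
  | x :: xs, c =>
    if c x ≠ 0 then pvF xs (fun y => if y = x then c x - 1 else c y)
    else x :: pvF xs c

theorem pvRemoveStep_eq_erase (k : List String) (w : String) :
    pvRemoveStep k w = k.erase w := by
  unfold pvRemoveStep
  by_cases h : w ∈ k
  · simp [h, PySem.List.remove?_eq_some_erase k w h]
  · simp [h, List.erase_of_not_mem h]

theorem pvF_zero (key : List String) (c : String → Int) (h : ∀ x, c x = 0) :
    pvF key c = key := by
  induction key with
  | nil => rfl
  | cons x xs ih => simp [pvF, h x, ih]

theorem pvF_erase (w : String) (key : List String) (c : String → Int)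
    (h : ∀ x, 0 ≤ c x) :
    pvF (key.erase w) c = pvF key (fun y => if y = w then c w + 1 else c y) := by
  induction key generalizing c with
  | nil => rfl
  | cons x xs ih =>
    by_cases hxw : x = w
    · subst hxw
      rw [List.erase_cons_head]
      have hne : c x + 1 ≠ 0 := by have := h x; omega
      conv_rhs => simp only [pvF]
      rw [if_pos (by simpa using hne)]
      have hfn : (fun y => if y = x then (if True then c x + 1 else c x) - 1
            else if y = x then c x + 1 else c y) = c := by
        funext y; by_cases hy : y = x <;> simp [hy]
      rw [hfn]
    · rw [List.erase_cons_tail (by simp [hxw])]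
      by_cases hcx : c x = 0
      · simp only [pvF, hcx, if_neg hxw, ne_eq, not_true_eq_false, if_false,
          not_not, if_pos rfl]
        rw [ih c h]
      · have hcx' : (if x = w then c w + 1 else c x) ≠ 0 := by simp [hxw, hcx]
        simp only [pvF, ne_eq, hcx, not_false_eq_true, if_true, hcx', if_neg hxw]
        rw [ih (fun y => if y = x then c x - 1 else c y)
            (by intro y; by_cases hy : y = x <;> simp [hy] <;> [skip; exact h y] <;> have := h x <;> omega)]
        congr 1
        funext y
        by_cases hyw : y = w <;> by_cases hyx : y = x <;>
          simp [hyw, hyx, hxw] <;> simp_all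
  -- (exact on every input: erase removes the first occurrence, matching Python list.remove)

theorem foldl_erase_eq_pvF (ws : List String) :
    ∀ key : List String, ws.foldl List.erase key = pvF key (fun x => (ws.count x : Int)) := by
  induction ws with
  | nil =>
    intro key
    simp only [List.foldl_nil]
    rw [pvF_zero key _ (by intro x; simp)]
  | cons w ws ih =>
    intro key
    simp only [List.foldl_cons]
    rw [ih (key.erase w), pvF_erase w key _ (by intro x; positivity)]
    congr 1
    funext y
    by_cases hy : y = w
    · subst hy; simp [List.count_cons]
    · simp [hy, List.count_cons, Ne.symm hy]

theorem pvPass_eq_pvF (key : List String) :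
    ∀ d : PySem.Dict String Int, (∀ x, 0 ≤ d.getD x 0) →
      pvPass d key = pvF key (fun x => d.getD x 0) := by
  induction key with
  | nil => intro d _; rfl
  | cons w ws ih =>
    intro d hd
    by_cases hb : d.getD w 0 ≠ 0
    · simp only [pvPass, pvF, hb, if_true]
      rw [ih (d.insert w (d.getD w 0 - 1))
          (by intro x; rw [PySem.Dict.getD_insert]; split <;> [have := hd w; exact hd x] <;> omega)]
      have hfn : (fun x => (d.insert w (d.getD w 0 - 1)).getD x 0)
          = (fun y => if y = w then d.getD w 0 - 1 else d.getD y 0) := by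
        funext y; rw [PySem.Dict.getD_insert]
      rw [hfn]
      simp [hb]
    · simp only [pvPass, pvF, hb, if_false]
      rw [ih d hd]

theorem getD_pvCountInto (ws : List String) :
    ∀ (d : PySem.Dict String Int) (x : String),
      (pvCountInto d ws).getD x 0 = d.getD x 0 + (ws.count x : Int) := by
  induction ws with
  | nil => intro d x; simp [pvCountInto]
  | cons w ws ih =>
    intro d x
    simp only [pvCountInto, List.foldl_cons] at *
    rw [ih (d.insert w (d.getD w 0 + 1)) x, PySem.Dict.getD_insert]
    by_cases hx : x = w <;>
      simp [hx, Ne.symm, List.count_cons] <;> push_cast <;> ring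

-- ===== VERDICT (by name: the statement is the Claim_ definition above) =====
theorem clear_group_and_compare_in_key_spec : Claim_equal_clear_group_and_compare_in_key := by
  intro key group compare _
  show clear_group_and_compare_in_key key group compare = clear_group_and_compare_in_key_alt key group compare
  show compare.foldl pvRemoveStep (group.foldl pvRemoveStep key)
      = pvPass (pvCountInto (pvCountInto PySem.Dict.empty group) compare) key
  have hstep : pvRemoveStep = List.erase := by
    funext k w; exact pvRemoveStep_eq_erase k w
  rw [hstep, ← List.foldl_append, foldl_erase_eq_pvF,
    pvPass_eq_pvF key _ (by
      intro x
      rw [getD_pvCountInto, getD_pvCountInto]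
      simp only [PySem.Dict.getD_empty]
      positivity)]
  congr 1
  funext x
  rw [getD_pvCountInto, getD_pvCountInto]
  simp [List.count_append]
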